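-- pv_equiv track=rewrite | github.com/thedealstream/source-zero | validate_source_zero.py | check_duplicate_urls
-- ===== SOURCE A (Python) =====
-- def check_duplicate_urls(urls: dict[str, str]) -> list[str]:
--     """Detect duplicate URLs assigned different source IDs."""
--     seen = {}
--     dupes = []
--     for sid, url in urls.items():
--         normalized = url.rstrip('/').lower()
--         if normalized in seen:
--             dupes.append(f"S{seen[normalized]} and S{sid} share URL: {url}")
--         else:
--             seen[normalized] = sid
--     if dupes:
--         return [f"DUPLICATE URLS: {len(dupes)} URLs appear more than once: {'; '.join(dupes[:3])}"]
--     return []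
-- ===== SOURCE B (Python) =====
-- def check_duplicate_urls(urls: dict[str, str]) -> list[str]:
--     """Detect duplicate URLs assigned different source IDs."""
--     groups = {}
--     for sid, url in urls.items():
--         groups.setdefault(url.rstrip('/').lower(), []).append(sid)
--     dupes = []
--     for sid, url in urls.items():
--         group = groups[url.rstrip('/').lower()]
--         if sid != group[0]:
--             dupes.append(f"S{group[0]} and S{sid} share URL: {url}")
--     if dupes:
--         return [f"DUPLICATE URLS: {len(dupes)} URLs appear more than once: {'; '.join(dupes[:3])}"]
--     return []
-- ===== Notes on version B (the rewrite author's own statement) =====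
-- stated objective: alternative
-- what changed: Replaces A's single pass with an evolving seen-dict by two passes: first build an index mapping each normalized URL to its list of source IDs, then walk the items again reporting every entry whose ID is not the first of its group.
import Mathlib
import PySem

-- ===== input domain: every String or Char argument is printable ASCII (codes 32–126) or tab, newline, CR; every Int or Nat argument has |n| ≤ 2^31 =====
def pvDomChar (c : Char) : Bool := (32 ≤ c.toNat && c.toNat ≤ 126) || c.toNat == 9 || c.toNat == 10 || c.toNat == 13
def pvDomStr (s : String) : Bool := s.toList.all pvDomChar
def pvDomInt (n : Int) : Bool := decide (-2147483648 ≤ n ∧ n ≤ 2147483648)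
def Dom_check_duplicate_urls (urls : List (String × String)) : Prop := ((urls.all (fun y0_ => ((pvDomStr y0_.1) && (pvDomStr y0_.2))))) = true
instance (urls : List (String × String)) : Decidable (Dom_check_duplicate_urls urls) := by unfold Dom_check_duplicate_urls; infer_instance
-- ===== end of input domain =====

-- B replaces A's single seen-dict pass by a group-index pass plus a reporting pass (alternative decomposition, same cost).

-- shared helper: url.rstrip('/').lower().  rstrip('/') strips one fixed ASCII char,
-- ported by hand on the char list (exact: drop trailing '/' characters).
def pvNorm (url : String) : String :=
  PySem.Str.lower (String.ofList ((url.toList.reverse.dropWhile (· == '/')).reverse))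

-- ===== PORT A =====
def check_duplicate_urls (urls : List (String × String)) : List String :=
  let st := urls.foldl (fun (st : PySem.Dict String String × List String) p =>
      let normalized := pvNorm p.2
      if st.1.contains normalized then
        (st.1, st.2 ++ ["S" ++ st.1.getD normalized "" ++ " and S" ++ p.1 ++ " share URL: " ++ p.2])
      else
        (st.1.insert normalized p.1, st.2)) (PySem.Dict.empty, [])
  if st.2 ≠ [] then
    ["DUPLICATE URLS: " ++ PySem.Int.toStr st.2.length ++ " URLs appear more than once: " ++ PySem.Str.join "; " (st.2.take 3)]
  else []

-- ===== PORT B =====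
def check_duplicate_urls_alt (urls : List (String × String)) : List String :=
  let groups := urls.foldl (fun (g : PySem.Dict String (List String)) p =>
      g.modify (pvNorm p.2) [] (· ++ [p.1])) PySem.Dict.empty
  let dupes := urls.foldl (fun (acc : List String) p =>
      let group := groups.getD (pvNorm p.2) []   -- groups[...] never misses; [] is unreachable
      if p.1 != group.headD "" then              -- group[0]: group is nonempty, default unreachable
        acc ++ ["S" ++ group.headD "" ++ " and S" ++ p.1 ++ " share URL: " ++ p.2]
      else acc) []
  if dupes ≠ [] then
    ["DUPLICATE URLS: " ++ PySem.Int.toStr dupes.length ++ " URLs appear more than once: " ++ PySem.Str.join "; " (dupes.take 3)]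
  else []

-- ===== PRECONDITION & SPEC =====
-- The Python parameter is a dict, whose keys (source IDs) are necessarily distinct; an
-- association list with a repeated source ID represents no dict input, so Pre_ requires Nodup keys.
def Pre_check_duplicate_urls (urls : List (String × String)) : Prop := (urls.map Prod.fst).Nodup
instance (urls : List (String × String)) : Decidable (Pre_check_duplicate_urls urls) := by unfold Pre_check_duplicate_urls; infer_instance
def pvWitness_check_duplicate_urls : (List (String × String)) := [("1", "http://A/"), ("2", "http://a")]
def Spec_check_duplicate_urls (urls : List (String × String)) (out : List String) : Prop := out = check_duplicate_urls_alt urls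
instance (urls : List (String × String)) (out : List String) : Decidable (Spec_check_duplicate_urls urls out) := by unfold Spec_check_duplicate_urls; infer_instance

-- ===== CLAIM (what is proved, stated in full; the proofs are below) =====
def Claim_equal_check_duplicate_urls : Prop := ∀ (urls : List (String × String)), Dom_check_duplicate_urls urls → Pre_check_duplicate_urls urls → Spec_check_duplicate_urls urls (check_duplicate_urls urls)

-- ===== LEMMAS AND PROOFS =====

-- the first source id assigned to a normalized url, read off the full list
def firstSid (l : List (String × String)) (n : String) : String :=
  ((l.find? (fun q => pvNorm q.2 == n)).map Prod.fst).getD ""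

-- A's seen-dict after processing a prefix
def seenOf (pre : List (String × String)) : PySem.Dict String String :=
  pre.foldl (fun d p => if d.contains (pvNorm p.2) then d else d.insert (pvNorm p.2) p.1)
    PySem.Dict.empty

theorem get?_seenOf (pre : List (String × String)) (n : String) :
    (seenOf pre).get? n = (pre.find? (fun q => pvNorm q.2 == n)).map Prod.fst := by
  induction pre using List.reverseRecOn generalizing n with
  | nil => simp [seenOf]
  | append_singleton pre p ih =>
    have hstep : seenOf (pre ++ [p]) =
        (if (seenOf pre).contains (pvNorm p.2) then seenOf pre
         else (seenOf pre).insert (pvNorm p.2) p.1) := by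
      simp only [seenOf, List.foldl_append, List.foldl_cons, List.foldl_nil]
    have hcontains : (seenOf pre).contains (pvNorm p.2)
        = (pre.find? (fun q => pvNorm q.2 == pvNorm p.2)).isSome := by
      rw [PySem.Dict.contains_eq_isSome_get?, ih, Option.isSome_map]
    rw [hstep, List.find?_append]
    by_cases hc : (pre.find? (fun q => pvNorm q.2 == pvNorm p.2)).isSome = true
    · rw [if_pos (by rw [hcontains]; exact hc), ih]
      cases hfind : pre.find? (fun q => pvNorm q.2 == n) with
      | some q => simp
      | none =>
        have hb : (pvNorm p.2 == n) = false := by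
          by_contra h
          have : pvNorm p.2 = n := by simpa using h
          rw [this] at hc
          simp [hfind] at hc
        simp [List.find?_cons_of_neg, hb]
    · rw [if_neg (by rw [hcontains]; exact hc)]
      rw [Option.not_isSome_iff_eq_none] at hc
      rw [PySem.Dict.get?_insert, ih]
      by_cases hne : n = pvNorm p.2
      · subst hne
        simp [hc, List.find?_cons_of_pos]
      · have hb : (pvNorm p.2 == n) = false := by simpa using Ne.symm hne
        simp [hne, hb, List.find?_cons_of_neg]

theorem seenOf_append (pre : List (String × String)) (p : String × String) :
    seenOf (pre ++ [p]) =
      (if (seenOf pre).contains (pvNorm p.2) then seenOf pre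
       else (seenOf pre).insert (pvNorm p.2) p.1) := by
  simp only [seenOf, List.foldl_append, List.foldl_cons, List.foldl_nil]

theorem loopA (full : List (String × String)) (h : (full.map Prod.fst).Nodup) :
    ∀ (rest pre : List (String × String)) (dupes : List String), pre ++ rest = full →
    (rest.foldl (fun (st : PySem.Dict String String × List String) p =>
      let normalized := pvNorm p.2
      if st.1.contains normalized then
        (st.1, st.2 ++ ["S" ++ st.1.getD normalized "" ++ " and S" ++ p.1 ++ " share URL: " ++ p.2])
      else
        (st.1.insert normalized p.1, st.2)) (seenOf pre, dupes)).2
    = dupes ++ (rest.filter (fun p => p.1 != firstSid full (pvNorm p.2))).map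
        (fun p => "S" ++ firstSid full (pvNorm p.2) ++ " and S" ++ p.1 ++ " share URL: " ++ p.2) := by
  intro rest
  induction rest with
  | nil => intro pre dupes _; simp
  | cons p rest ih =>
    intro pre dupes hfull
    simp only [List.foldl_cons]
    have hcontains : (seenOf pre).contains (pvNorm p.2)
        = (pre.find? (fun q => pvNorm q.2 == pvNorm p.2)).isSome := by
      rw [PySem.Dict.contains_eq_isSome_get?, get?_seenOf, Option.isSome_map]
    have hfull' : (pre ++ [p]) ++ rest = full := by
      rw [List.append_assoc, List.singleton_append]; exact hfull
    by_cases hc : (pre.find? (fun q => pvNorm q.2 == pvNorm p.2)).isSome = true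
    · obtain ⟨q, hq⟩ := Option.isSome_iff_exists.mp hc
      have hfsfull : firstSid full (pvNorm p.2) = q.1 := by
        rw [firstSid, ← hfull, List.find?_append, hq]; rfl
      have hgetD : (seenOf pre).getD (pvNorm p.2) "" = q.1 := by
        rw [PySem.Dict.getD_eq_get?_getD, get?_seenOf, hq]; rfl
      have hne : p.1 ≠ q.1 := by
        have h2 : ((pre ++ p :: rest).map Prod.fst).Nodup := by rw [hfull]; exact h
        rw [List.map_append, List.nodup_append] at h2
        intro heq
        exact h2.2.2 q.1 (List.mem_map_of_mem (List.mem_of_find?_eq_some hq)) p.1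
          (List.mem_map_of_mem List.mem_cons_self) heq.symm
      have hseen : seenOf (pre ++ [p]) = seenOf pre := by
        rw [seenOf_append, if_pos (by rw [hcontains]; exact hc)]
      rw [if_pos (by rw [hcontains]; exact hc)]
      have := ih (pre ++ [p])
        (dupes ++ ["S" ++ (seenOf pre).getD (pvNorm p.2) "" ++ " and S" ++ p.1 ++ " share URL: " ++ p.2])
        hfull'
      rw [hseen] at this
      rw [this, List.filter_cons]
      have hcond : (p.1 != firstSid full (pvNorm p.2)) = true := by
        rw [hfsfull]; exact bne_iff_ne.mpr hne
      rw [hcond]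
      simp [hgetD, hfsfull, List.append_assoc]
    · have hcn : pre.find? (fun q => pvNorm q.2 == pvNorm p.2) = none :=
        Option.not_isSome_iff_eq_none.mp (by simpa using hc)
      have hfsfull : firstSid full (pvNorm p.2) = p.1 := by
        rw [firstSid, ← hfull, List.find?_append, hcn, Option.none_or,
          List.find?_cons_of_pos (by simp)]
        rfl
      have hseen : seenOf (pre ++ [p]) = (seenOf pre).insert (pvNorm p.2) p.1 := by
        rw [seenOf_append, if_neg (by rw [hcontains, hcn]; simp)]
      rw [if_neg (by rw [hcontains, hcn]; simp)]
      have := ih (pre ++ [p]) dupes hfull'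
      rw [hseen] at this
      rw [this, List.filter_cons]
      have hcond : (p.1 != firstSid full (pvNorm p.2)) = false := by
        rw [hfsfull]; simp
      rw [hcond]
      simp

theorem dupesB_eq (urls : List (String × String)) :
    (urls.foldl (fun (acc : List String) p =>
      let group := (urls.foldl (fun (g : PySem.Dict String (List String)) p =>
        g.modify (pvNorm p.2) [] (· ++ [p.1])) PySem.Dict.empty).getD (pvNorm p.2) []
      if p.1 != group.headD "" then
        acc ++ ["S" ++ group.headD "" ++ " and S" ++ p.1 ++ " share URL: " ++ p.2]
      else acc) [])
    = (urls.filter (fun p => p.1 != firstSid urls (pvNorm p.2))).map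
        (fun p => "S" ++ firstSid urls (pvNorm p.2) ++ " and S" ++ p.1 ++ " share URL: " ++ p.2) := by
  have hG : ∀ n : String,
      ((urls.foldl (fun (g : PySem.Dict String (List String)) p =>
        g.modify (pvNorm p.2) [] (· ++ [p.1])) PySem.Dict.empty).getD n []).headD ""
      = firstSid urls n := by
    intro n
    have hfold : urls.foldl (fun (g : PySem.Dict String (List String)) p =>
        g.modify (pvNorm p.2) [] (· ++ [p.1])) PySem.Dict.empty
        = (urls.map (fun p => (pvNorm p.2, p.1))).foldl
            (fun d q => d.modify q.1 [] (· ++ [q.2])) PySem.Dict.empty := by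
      rw [List.foldl_map]
    rw [hfold, PySem.Dict.getD_foldl_modify_append]
    have hempty : (PySem.Dict.empty : PySem.Dict String (List String)).getD n [] = [] := by
      apply PySem.Dict.getD_of_get?_eq_none; exact PySem.Dict.get?_empty n
    rw [hempty, List.nil_append, List.filter_map, List.map_map]
    have hpred : ((fun (q : String × String) => q.1 == n) ∘ fun (p : String × String) => (pvNorm p.2, p.1))
        = fun (q : String × String) => pvNorm q.2 == n := rfl
    rw [hpred, firstSid]
    rw [List.headD_eq_head?_getD, List.head?_map, List.head?_filter]
    rfl
  dsimp only
  rw [PySem.List.foldl_append_if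
    (fun p : String × String => p.1 != ((urls.foldl (fun (g : PySem.Dict String (List String)) (r : String × String) =>
        g.modify (pvNorm r.2) [] (· ++ [r.1])) PySem.Dict.empty).getD (pvNorm p.2) []).headD "")
    (fun p : String × String => "S" ++ ((urls.foldl (fun (g : PySem.Dict String (List String)) (r : String × String) =>
        g.modify (pvNorm r.2) [] (· ++ [r.1])) PySem.Dict.empty).getD (pvNorm p.2) []).headD ""
        ++ " and S" ++ p.1 ++ " share URL: " ++ p.2) urls []]
  rw [List.nil_append]
  rw [List.filter_congr (fun x _ => by rw [hG (pvNorm x.2)])]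
  exact List.map_congr_left (fun x _ => by rw [hG (pvNorm x.2)])

-- ===== VERDICT (by name: the statement is the Claim_ definition above) =====
theorem check_duplicate_urls_spec : Claim_equal_check_duplicate_urls := by
  intro urls _ hpre
  unfold Spec_check_duplicate_urls check_duplicate_urls check_duplicate_urls_alt
  have hA := loopA urls hpre urls [] [] rfl
  simp only [seenOf, List.foldl_nil] at hA
  dsimp only
  rw [hA, dupesB_eq, List.nil_append]
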